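-- pv_equiv track=rewrite | github.com/AlexArgese/ai-scientist-storyteller | scripts/flan_t5_train5.py | map_record
-- ===== SOURCE A (Python) =====
-- from typing import List, Tuple, Dict, Any
--
-- def map_record(rec: dict, source_field: str, target_field: str) -> Tuple[str,str]:
--     if source_field in rec and target_field in rec:
--         return str(rec[source_field]), str(rec[target_field])
--     for s in ["input","source","prompt","instruction","question","text","context"]:
--         for t in ["output","target","answer","story","completion","response"]:
--             if s in rec and t in rec:
--                 return str(rec[s]), str(rec[t])
--     raise KeyError(f"Manca source/target nel record: {list(rec.keys())}")
-- ===== SOURCE B (Python) =====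
-- SRC_KEYS = ["input","source","prompt","instruction","question","text","context"]
-- TGT_KEYS = ["output","target","answer","story","completion","response"]
--
-- def map_record(rec: dict, source_field: str, target_field: str):
--     if source_field in rec and target_field in rec:
--         return str(rec[source_field]), str(rec[target_field])
--     s = next((k for k in SRC_KEYS if k in rec), None)
--     t = next((k for k in TGT_KEYS if k in rec), None)
--     if s is not None and t is not None:
--         return str(rec[s]), str(rec[t])
--     raise KeyError(f"Manca source/target nel record: {list(rec.keys())}")
-- ===== Notes on version B (the rewrite author's own statement) =====
-- stated objective: simpler
-- what changed: Replaces the nested source×target candidate loop with two independent first-match scans over the fixed key lists, exploiting that the two membership conditions are independent.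
import Mathlib
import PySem

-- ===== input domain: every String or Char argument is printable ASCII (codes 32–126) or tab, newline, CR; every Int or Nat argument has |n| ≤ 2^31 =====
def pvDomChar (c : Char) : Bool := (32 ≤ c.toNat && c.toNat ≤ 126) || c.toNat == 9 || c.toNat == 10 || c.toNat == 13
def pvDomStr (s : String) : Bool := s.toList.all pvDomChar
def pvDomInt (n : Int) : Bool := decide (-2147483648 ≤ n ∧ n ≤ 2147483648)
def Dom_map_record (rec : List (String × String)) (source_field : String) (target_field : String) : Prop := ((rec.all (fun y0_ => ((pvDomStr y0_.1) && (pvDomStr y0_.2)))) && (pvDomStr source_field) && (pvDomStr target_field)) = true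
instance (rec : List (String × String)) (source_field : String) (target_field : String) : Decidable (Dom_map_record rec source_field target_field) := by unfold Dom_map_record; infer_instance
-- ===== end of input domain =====

-- B changes the nested s×t product loop into two independent first-match scans; objective: simpler.
-- Pre_ excludes exactly the inputs where A raises KeyError (no usable source/target key pair).

-- ===== PORT A =====
-- 'k in rec' on the dict (assoc list, first match wins on lookup)
def pvKeyIn (rec : List (String × String)) (k : String) : Bool :=
  rec.any (fun p => p.1 == k)

-- rec[k] (values are already strings, so str(rec[k]) = rec[k]); "" never surfaces under Pre_
def pvGetKey (rec : List (String × String)) (k : String) : String :=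
  match rec.find? (fun p => p.1 == k) with
  | some p => p.2
  | none => ""

def pvSrcKeys : List String :=
  ["input","source","prompt","instruction","question","text","context"]
def pvTgtKeys : List String :=
  ["output","target","answer","story","completion","response"]

-- inner 'for t in …' loop for a fixed s
def pvInnerLoop (rec : List (String × String)) (s : String) : List String → Option (String × String)
  | [] => none
  | t :: ts =>
      if pvKeyIn rec s && pvKeyIn rec t then some (pvGetKey rec s, pvGetKey rec t)
      else pvInnerLoop rec s ts

-- outer 'for s in …' loop
def pvOuterLoop (rec : List (String × String)) : List String → Option (String × String)
  | [] => none
  | s :: ss =>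
      match pvInnerLoop rec s pvTgtKeys with
      | some p => some p
      | none => pvOuterLoop rec ss

def map_record (rec : List (String × String)) (source_field : String) (target_field : String) : String × String :=
  if pvKeyIn rec source_field && pvKeyIn rec target_field then
    (pvGetKey rec source_field, pvGetKey rec target_field)
  else
    match pvOuterLoop rec pvSrcKeys with
    | some p => p
    | none => ("", "")   -- Python raises KeyError here; excluded by Pre_

-- ===== PORT B =====
def map_record_alt (rec : List (String × String)) (source_field : String) (target_field : String) : String × String :=
  if pvKeyIn rec source_field && pvKeyIn rec target_field then
    (pvGetKey rec source_field, pvGetKey rec target_field)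
  else
    match pvSrcKeys.find? (pvKeyIn rec), pvTgtKeys.find? (pvKeyIn rec) with
    | some s, some t => (pvGetKey rec s, pvGetKey rec t)
    | _, _ => ("", "")   -- Python raises KeyError here; excluded by Pre_

-- ===== PRECONDITION & SPEC =====
-- Pre_ = exactly the inputs on which A returns (otherwise A raises KeyError)
def Pre_map_record (rec : List (String × String)) (source_field : String) (target_field : String) : Prop :=
  ((pvKeyIn rec source_field && pvKeyIn rec target_field)
   || (pvSrcKeys.any (pvKeyIn rec) && pvTgtKeys.any (pvKeyIn rec))) = true
instance (rec : List (String × String)) (source_field : String) (target_field : String) : Decidable (Pre_map_record rec source_field target_field) := by unfold Pre_map_record; infer_instance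

def pvWitness_map_record : (List (String × String)) × String × String :=
  ([("input", "a question"), ("output", "a story")], "src", "tgt")

def Spec_map_record (rec : List (String × String)) (source_field : String) (target_field : String) (out : String × String) : Prop := out = map_record_alt rec source_field target_field
instance (rec : List (String × String)) (source_field : String) (target_field : String) (out : String × String) : Decidable (Spec_map_record rec source_field target_field out) := by unfold Spec_map_record; infer_instance

-- ===== CLAIM (what is proved, stated in full; the proofs are below) =====
def Claim_equal_map_record : Prop := ∀ (rec : List (String × String)) (source_field : String) (target_field : String), Dom_map_record rec source_field target_field → Pre_map_record rec source_field target_field → Spec_map_record rec source_field target_field (map_record rec source_field target_field)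

-- ===== LEMMAS AND PROOFS =====

-- inner loop = scan of the target list, provided s is a key
lemma pvInnerLoop_eq (rec : List (String × String)) (s : String) (ts : List String) :
    pvInnerLoop rec s ts =
      if pvKeyIn rec s then (ts.find? (pvKeyIn rec)).map (fun t => (pvGetKey rec s, pvGetKey rec t))
      else none := by
  induction ts with
  | nil => simp [pvInnerLoop]
  | cons t ts ih =>
      simp only [pvInnerLoop, List.find?]
      by_cases hs : pvKeyIn rec s <;> by_cases ht : pvKeyIn rec t <;>
        simp [hs, ht, ih]

-- outer loop = two independent first-match scans
lemma pvOuterLoop_eq (rec : List (String × String)) (ss : List String) :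
    pvOuterLoop rec ss =
      match ss.find? (pvKeyIn rec), pvTgtKeys.find? (pvKeyIn rec) with
      | some s, some t => some (pvGetKey rec s, pvGetKey rec t)
      | _, _ => none := by
  induction ss with
  | nil => cases pvTgtKeys.find? (pvKeyIn rec) <;> simp [pvOuterLoop]
  | cons s ss ih =>
      simp only [pvOuterLoop, pvInnerLoop_eq, List.find?]
      by_cases hs : pvKeyIn rec s
      · simp only [hs, if_pos]
        cases h : pvTgtKeys.find? (pvKeyIn rec) with
        | none => rw [ih, h]; cases ss.find? (pvKeyIn rec) <;> simp
        | some t => simp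
      · simp only [hs, if_neg, Bool.false_eq_true, not_false_iff, ih]

-- ===== VERDICT (by name: the statement is the Claim_ definition above) =====
theorem map_record_spec : Claim_equal_map_record := by
  intro rec sf tf _ _
  unfold Spec_map_record map_record map_record_alt
  rw [pvOuterLoop_eq]
  cases hS : pvSrcKeys.find? (pvKeyIn rec) <;>
    cases hT : pvTgtKeys.find? (pvKeyIn rec) <;> simp
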